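-- pv_equiv track=rewrite | github.com/TrawlingAttack/PassGPTv2 | module/guessfuse.py | generate_power_intervals
-- ===== SOURCE A (Python) =====
-- def generate_power_intervals(k):
--     intervals = []
--     tolerance, temp, base = 1, 0, 10
--     while temp < k:
--         if temp < base:
--             intervals.append((temp, temp + tolerance))
--             temp += tolerance
--         else:
--             tolerance = base
--             intervals.append((temp, temp + tolerance))
--             temp += tolerance
--             base *= 10
--     return intervals
-- ===== SOURCE B (Python) =====
-- def _interval(i):
--     # closed-form i-th interval: widths group in decades of the index space
--     if i < 10:
--         return (i, i + 1)
--     d = (i - 10) // 9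
--     m = (i - 10) % 9
--     w = 10 ** (d + 1)
--     return ((m + 1) * w, (m + 2) * w)
--
--
-- def generate_power_intervals(k):
--     if k <= 0:
--         return []
--     if k <= 10:
--         n = k
--     else:
--         # find d >= 1 with 10**d < k <= 10**(d+1)
--         step, d = 10, 1
--         while step * 10 < k:
--             step *= 10
--             d += 1
--         n = 10 + 9 * (d - 1) + (k - 1) // step
--     return [_interval(i) for i in range(n)]
-- ===== Notes on version B (the rewrite author's own statement) =====
-- stated objective: alternative
-- what changed: Replaces A's stateful widening-loop simulation by direct construction: the number of intervals n is computed arithmetically from k's magnitude (one tiny scan for the leading power of ten plus a floor division), and the result is a map of a closed-form index->interval formula over range(n).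
import Mathlib
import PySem

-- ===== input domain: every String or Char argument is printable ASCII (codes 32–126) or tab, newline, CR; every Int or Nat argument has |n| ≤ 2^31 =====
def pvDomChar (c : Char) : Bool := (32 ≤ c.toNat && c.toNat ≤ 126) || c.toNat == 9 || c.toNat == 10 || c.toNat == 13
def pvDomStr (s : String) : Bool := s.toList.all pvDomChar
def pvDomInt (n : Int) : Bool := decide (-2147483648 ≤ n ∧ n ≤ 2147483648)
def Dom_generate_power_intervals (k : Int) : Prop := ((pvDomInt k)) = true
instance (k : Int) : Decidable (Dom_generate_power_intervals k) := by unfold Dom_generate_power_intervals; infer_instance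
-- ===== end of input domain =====

-- B builds the result directly instead of simulating A's stateful widening loop: it computes
-- the interval count n arithmetically from k's magnitude and maps a closed-form
-- index->interval formula over range(n).

-- ===== PORT A =====
-- A's while loop; fuel is only a termination guard (each iteration raises temp by ≥ 1).
def pvLoopA (k : Int) : Nat → List (Int × Int) → Int → Int → Int → List (Int × Int)
  | 0, acc, _, _, _ => acc
  | f + 1, acc, tol, temp, base =>
    if temp < k then
      if temp < base then
        pvLoopA k f (acc ++ [(temp, temp + tol)]) tol (temp + tol) base
      else
        pvLoopA k f (acc ++ [(temp, temp + base)]) base (temp + base) (base * 10)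
    else acc

def generate_power_intervals (k : Int) : List (Int × Int) :=
  pvLoopA k (k.toNat + 1) [] 1 0 10

-- ===== PORT B =====
-- Source B's _interval: closed-form i-th interval. 10 ** (d+1) is ported as a Nat-exponent
-- power, exact here since d ≥ 0 on the branch that uses it (i ≥ 10).
def pvIntervalB (i : Int) : Int × Int :=
  if i < 10 then (i, i + 1)
  else
    let d := PySem.Int.floordiv (i - 10) 9
    let m := PySem.Int.mod (i - 10) 9
    let w := (10 : Int) ^ (d + 1).toNat
    ((m + 1) * w, (m + 2) * w)

-- Source B's scan for the leading power of ten; fuel is only a termination guard.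
def pvScanB (k : Int) : Nat → Int → Int → Int × Int
  | 0, step, d => (step, d)
  | f + 1, step, d => if step * 10 < k then pvScanB k f (step * 10) (d + 1) else (step, d)

def generate_power_intervals_alt (k : Int) : List (Int × Int) :=
  if k ≤ 0 then []
  else
    let n := if k ≤ 10 then k
      else
        let sd := pvScanB k k.toNat 10 1
        10 + 9 * (sd.2 - 1) + PySem.Int.floordiv (k - 1) sd.1
    (PySem.List.pyRange 0 n 1).map pvIntervalB

-- ===== PRECONDITION & SPEC =====
def Spec_generate_power_intervals (k : Int) (out : List (Int × Int)) : Prop := out = generate_power_intervals_alt k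
instance (k : Int) (out : List (Int × Int)) : Decidable (Spec_generate_power_intervals k out) := by unfold Spec_generate_power_intervals; infer_instance

-- ===== CLAIM (what is proved, stated in full; the proofs are below) =====
def Claim_equal_generate_power_intervals : Prop := ∀ (k : Int), Dom_generate_power_intervals k → Spec_generate_power_intervals k (generate_power_intervals k)

-- ===== LEMMAS AND PROOFS =====

theorem pvLoopA_notlt (k : Int) (f : Nat) (acc : List (Int × Int)) (tol temp base : Int)
    (h : ¬ temp < k) : pvLoopA k f acc tol temp base = acc := by
  cases f <;> simp [pvLoopA, h]

-- for j ∈ [1,9] in decade a+1: interval at index 10+9a+(j-1) is (j*10^(a+1), (j+1)*10^(a+1))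

theorem pvIntervalB_lt10 (i : Int) (h : i < 10) : pvIntervalB i = (i, i + 1) := by
  simp [pvIntervalB, h]

-- start of interval i is at least 10 when i ≥ 10

theorem pvIntervalB_ge10 (a : Nat) (b : Int) (hb : 0 ≤ b) (hb9 : b < 9) :
    pvIntervalB (10 + 9 * (a : Int) + b)
      = ((b + 1) * 10 ^ (a + 1), (b + 2) * 10 ^ (a + 1)) := by
  have hn : ¬ ((10 : Int) + 9 * a + b < 10) := by omega
  have hd : PySem.Int.floordiv (10 + 9 * (a : Int) + b - 10) 9 = a := by
    rw [PySem.Int.floordiv_eq_iff_of_pos (by omega)]; omega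
  have hm : PySem.Int.mod (10 + 9 * (a : Int) + b - 10) 9 = b := by
    rw [PySem.Int.mod_eq_emod_of_pos (by omega)]; omega
  simp only [pvIntervalB, hn, if_false, hd, hm]
  norm_num

theorem pvStart_ge10 (i : Int) (h : ¬ i < 10) : 10 ≤ (pvIntervalB i).1 := by
  have he : 0 ≤ i - 10 := by omega
  have hd0 : 0 ≤ PySem.Int.floordiv (i - 10) 9 := by
    rw [PySem.Int.floordiv_eq_ediv_of_pos (by omega)]; omega
  have hm0 : 0 ≤ PySem.Int.mod (i - 10) 9 := PySem.Int.mod_nonneg _ (by omega)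
  simp only [pvIntervalB, h, if_false]
  have hw : (10 : Int) ≤ 10 ^ (PySem.Int.floordiv (i - 10) 9 + 1).toNat := by
    have h1 : 1 ≤ (PySem.Int.floordiv (i - 10) 9 + 1).toNat := by omega
    calc (10 : Int) = 10 ^ 1 := by norm_num
    _ ≤ 10 ^ (PySem.Int.floordiv (i - 10) 9 + 1).toNat :=
        pow_le_pow_right₀ (by norm_num) h1
  nlinarith [hm0, hw]

-- q = (k-1) // 10^dn bounds

theorem pv_bridge_small (k : Int) (h0 : 0 < k) (h10 : k ≤ 10) :
    ∀ i : Int, 0 ≤ i → ((pvIntervalB i).1 < k ↔ i < k) := by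
  intro i hi
  by_cases h : i < 10
  · rw [pvIntervalB_lt10 i h]
  · have := pvStart_ge10 i h
    constructor <;> intro hlt <;> omega

theorem pv_bridge_big (k : Int) (dn : Nat) (hd : 1 ≤ dn)
    (hlow : (10:Int)^dn < k) (hhigh : k ≤ 10^(dn+1)) :
    ∀ i : Int, 0 ≤ i →
      ((pvIntervalB i).1 < k ↔ i < 10 + 9 * ((dn:Int) - 1) + PySem.Int.floordiv (k-1) (10^dn)) := by
  have hp : (0:Int) < 10 ^ dn := by positivity
  set q := PySem.Int.floordiv (k-1) (10^dn) with hq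
  have hql : q * 10^dn ≤ k - 1 ∧ k - 1 < (q+1) * 10^dn := by
    rw [hq]
    have := PySem.Int.floordiv_eq_iff_of_pos (a := k-1) (b := 10^dn)
      (q := PySem.Int.floordiv (k-1) (10^dn)) hp
    exact this.mp rfl
  have hq1 : 1 ≤ q := by nlinarith [hql.2]
  have hq9 : q ≤ 9 := by
    have h1 : 10 ^ (dn+1) = 10 * 10^dn := by ring
    nlinarith [hql.1]
  intro i hi
  by_cases h : i < 10
  · rw [pvIntervalB_lt10 i h]
    have : (10:Int) ≤ 10 ^ dn := by
      calc (10:Int) = 10 ^ 1 := by norm_num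
      _ ≤ 10^dn := pow_le_pow_right₀ (by norm_num) hd
    constructor <;> intro _ <;> omega
  · -- decompose i = 10 + 9a + b
    have he : 0 ≤ i - 10 := by omega
    obtain ⟨an, han⟩ : ∃ an : Nat, (an : Int) = (i - 10) / 9 := ⟨((i-10)/9).toNat, by omega⟩
    set b := (i - 10) % 9 with hbd
    have hb0 : 0 ≤ b := by omega
    have hb9 : b < 9 := by omega
    have hi' : i = 10 + 9 * (an : Int) + b := by omega
    rw [hi', pvIntervalB_ge10 an b hb0 hb9]
    simp only
    -- goal: (b+1) * 10^(an+1) < k ↔ 10 + 9an + b < 10 + 9(dn-1) + q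
    rcases lt_trichotomy (an + 1) dn with hc | hc | hc
    · -- an + 1 ≤ dn - 1
      obtain ⟨c, hcc⟩ : ∃ c : Nat, dn = an + 1 + c + 1 := ⟨dn - an - 2, by omega⟩
      have hle : (10:Int)^(an+1) * 10 ≤ 10^dn := by
        rw [hcc]
        have : (10:Int)^(an+1) * 10 = 10^(an+2) := by ring
        rw [this]
        exact pow_le_pow_right₀ (by norm_num) (by omega)
      have hstart : (b+1) * 10^(an+1) < k := by nlinarith [pow_pos (show (0:Int) < 10 by norm_num) (an+1)]
      have : ((an:Int)) + 1 < dn := by exact_mod_cast hc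
      constructor <;> intro _
      · omega
      · exact hstart
    · -- an + 1 = dn
      have hdn : (10:Int)^dn = 10^(an+1) := by rw [← hc]
      rw [hdn] at hql
      have hiff : (b+1) * 10^(an+1) < k ↔ b + 1 ≤ q := by
        constructor
        · intro hlt
          by_contra hcon
          push Not at hcon
          nlinarith [pow_pos (show (0:Int) < 10 by norm_num) (an+1)]
        · intro hle
          nlinarith [pow_pos (show (0:Int) < 10 by norm_num) (an+1)]
      rw [hiff]
      have : (an:Int) + 1 = dn := by exact_mod_cast hc
      omega
    · -- dn < an + 1, i.e. dn + 1 ≤ an + 1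
      have hle : (10:Int)^(dn+1) ≤ 10^(an+1) :=
        pow_le_pow_right₀ (by norm_num) (by omega)
      have hstart : ¬ (b+1) * 10^(an+1) < k := by
        push Not
        nlinarith [pow_pos (show (0:Int) < 10 by norm_num) (an+1)]
      have : (dn:Int) < an + 1 := by exact_mod_cast hc
      constructor <;> intro hx
      · exact absurd hx hstart
      · omega

theorem pvScanB_spec (k : Int) : ∀ (f : Nat) (dn : Nat), 1 ≤ dn → (10:Int)^dn < k →
    k ≤ 10^(dn+1) * 10^f →
    ∃ e : Nat, dn ≤ e ∧ pvScanB k f ((10:Int)^dn) (dn:Int) = (10^e, (e:Int)) ∧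
      10^e < k ∧ k ≤ 10^(e+1) := by
  intro f
  induction f with
  | zero =>
    intro dn h1 hlow hhigh
    refine ⟨dn, le_refl _, ?_, hlow, by simpa using hhigh⟩
    have : ¬ (10:Int)^dn * 10 < k := by
      have : (10:Int)^dn * 10 = 10^(dn+1) := by ring
      rw [this]; omega
    simp only [pvScanB]
  | succ f ih =>
    intro dn h1 hlow hhigh
    by_cases h : (10:Int)^dn * 10 < k
    · have hstep : (10:Int)^dn * 10 = 10^(dn+1) := by ring
      have hrec := ih (dn+1) (by omega) (by rw [← hstep]; exact h)
        (by
          have h1 : (10:Int) ^ (dn+1+1) * 10 ^ f = 10 ^ (dn+1) * 10 ^ (f+1) := by ring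
          rw [h1]; exact hhigh)
      obtain ⟨e, he1, he2, he3, he4⟩ := hrec
      refine ⟨e, by omega, ?_, he3, he4⟩
      simp only [pvScanB, h, if_true]
      rw [hstep, show ((dn:Int) + 1) = ((dn+1 : Nat) : Int) by push_cast; ring]
      exact he2
    · refine ⟨dn, le_refl _, ?_, hlow, ?_⟩
      · simp [pvScanB, h]
      · have : (10:Int)^dn * 10 = 10^(dn+1) := by ring
        omega

-- index of the interval emitted at A's state (decade d, position j)
def pvIdx (d : Nat) (j : Int) : Int := if d = 0 then j else 10 + 9 * ((d:Int) - 1) + (j - 1)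

theorem pvIntervalB_decade (a : Nat) (j : Int) (h1 : 1 ≤ j) (h9 : j ≤ 9) :
    pvIntervalB (10 + 9 * (a : Int) + (j - 1)) = (j * 10 ^ (a + 1), (j + 1) * 10 ^ (a + 1)) := by
  rw [pvIntervalB_ge10 a (j-1) (by omega) (by omega)]
  rw [Prod.ext_iff]
  refine ⟨?_, ?_⟩ <;> simp only [] <;> ring_nf

-- A's loop, started at any reachable state, emits exactly the intervals of indices pvIdx d j .. N-1
theorem pvA_main (k N : Int)
    (hb : ∀ i : Int, 0 ≤ i → ((pvIntervalB i).1 < k ↔ i < N)) :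
    ∀ (fuel : Nat) (d : Nat) (j tol temp base : Int) (acc : List (Int × Int)),
    ((d = 0 ∧ 0 ≤ j ∧ j ≤ 9 ∧ tol = 1 ∧ base = 10 ∧ temp = j)
     ∨ (1 ≤ d ∧ j = 1 ∧ temp = 10^d ∧ base = 10^d)
     ∨ (1 ≤ d ∧ 2 ≤ j ∧ j ≤ 9 ∧ tol = 10^d ∧ base = 10^(d+1) ∧ temp = j * 10^d)) →
    (k - temp).toNat ≤ fuel →
    pvLoopA k fuel acc tol temp base = acc ++ (PySem.List.pyRange (pvIdx d j) N 1).map pvIntervalB := by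
  intro fuel
  induction fuel with
  | zero =>
    intro d j tol temp base acc hst hf
    have hidx0 : 0 ≤ pvIdx d j := by
      rcases hst with ⟨hd,h2,_⟩|⟨h1,h2,_⟩|⟨h1,h2,h3,_⟩ <;> unfold pvIdx <;> [skip; skip; skip] <;>
        first
        | (rw [if_pos hd]; omega)
        | (rw [if_neg (by omega)]; omega)
    have hstart : (pvIntervalB (pvIdx d j)).1 = temp := by
      rcases hst with ⟨hd,h2,h3,_,_,h6⟩|⟨h1,h2,h3,_⟩|⟨h1,h2,h3,_,_,h6⟩
      · subst hd; unfold pvIdx; rw [if_pos rfl, pvIntervalB_lt10 j (by omega)]; omega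
      · obtain ⟨a, rfl⟩ : ∃ a, d = a + 1 := ⟨d - 1, by omega⟩
        unfold pvIdx; rw [if_neg (by omega)]
        have : (10:Int) + 9 * (((a+1:Nat):Int) - 1) + (j - 1) = 10 + 9 * (a:Int) + (j - 1) := by
          push_cast; ring
        rw [this, pvIntervalB_decade a j (by omega) (by omega)]
        simp [h2, h3]
      · obtain ⟨a, rfl⟩ : ∃ a, d = a + 1 := ⟨d - 1, by omega⟩
        unfold pvIdx; rw [if_neg (by omega)]
        have : (10:Int) + 9 * (((a+1:Nat):Int) - 1) + (j - 1) = 10 + 9 * (a:Int) + (j - 1) := by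
          push_cast; ring
        rw [this, pvIntervalB_decade a j (by omega) (by omega)]
        simp [h6]
    have hk : ¬ temp < k := by omega
    rw [pvLoopA_notlt k 0 acc tol temp base hk]
    have : N ≤ pvIdx d j := by
      by_contra hcon
      have := (hb (pvIdx d j) hidx0).mpr (by omega)
      omega
    rw [PySem.List.pyRange_one_eq_nil this]
    simp
  | succ fuel ih =>
    intro d j tol temp base acc hst hf
    have hidx0 : 0 ≤ pvIdx d j := by
      rcases hst with ⟨hd,h2,_⟩|⟨h1,h2,_⟩|⟨h1,h2,h3,_⟩ <;> unfold pvIdx <;>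
        first
        | (rw [if_pos hd]; omega)
        | (rw [if_neg (by omega)]; omega)
    by_cases h : temp < k
    · -- one loop step
      rcases hst with ⟨hd,h2,h3,h4,h5,h6⟩|⟨h1,h2,h3,h4⟩|⟨h1,h2,h3,h4,h5,h6⟩
      · -- decade 0: tol=1, base=10, temp=j ∈ [0,9]
        subst hd h4 h5
        rw [h6] at hf h ⊢
        have hidx : pvIdx 0 j = j := by unfold pvIdx; rw [if_pos rfl]
        have hfull : pvIntervalB (pvIdx 0 j) = (j, j + 1) := by
          rw [hidx, pvIntervalB_lt10 j (by omega)]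
        have hlt : pvIdx 0 j < N := (hb _ hidx0).mp (by rw [hfull]; exact h)
        rw [PySem.List.pyRange_one_cons (by omega : pvIdx 0 j < N)]
        simp only [List.map_cons, hfull]
        have hstep : pvLoopA k (fuel+1) acc 1 j 10 =
            pvLoopA k fuel (acc ++ [(j, j + 1)]) 1 (j + 1) 10 := by
          simp [pvLoopA, h, show j < (10:Int) by omega]
        rw [hstep]
        by_cases hj : j ≤ 8
        · have := ih 0 (j+1) 1 (j+1) 10 (acc ++ [(j, j+1)])
            (Or.inl ⟨rfl, by omega, by omega, rfl, rfl, rfl⟩) (by omega)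
          rw [this]
          have : pvIdx 0 (j+1) = pvIdx 0 j + 1 := by unfold pvIdx; simp
          rw [this]
          simp
        · -- j = 9: next state is decade 1 boundary
          have hj9 : j = 9 := by omega
          subst hj9
          have := ih 1 1 1 10 10 (acc ++ [(9, 10)])
            (Or.inr (Or.inl ⟨by omega, rfl, by norm_num, by norm_num⟩)) (by omega)
          rw [show (9:Int) + 1 = 10 by norm_num] at *
          rw [this]
          have : pvIdx 1 1 = pvIdx 0 9 + 1 := by unfold pvIdx; norm_num
          rw [this]
          simp
      · -- boundary of decade d ≥ 1: temp = base = 10^d, else-branch fires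
        obtain ⟨a, rfl⟩ : ∃ a, d = a + 1 := ⟨d - 1, by omega⟩
        subst h2 h3 h4
        have hidxe : pvIdx (a+1) 1 = 10 + 9 * (a:Int) + 0 := by
          unfold pvIdx; rw [if_neg (by omega)]; push_cast; ring
        have hfull : pvIntervalB (pvIdx (a+1) 1) = (10^(a+1), 2 * 10^(a+1)) := by
          rw [hidxe, show (10:Int) + 9*(a:Int) + 0 = 10 + 9*(a:Int) + (1-1) by ring,
            pvIntervalB_decade a 1 (by omega) (by omega)]
          norm_num
        have hlt : pvIdx (a+1) 1 < N := (hb _ hidx0).mp (by rw [hfull]; exact h)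
        rw [PySem.List.pyRange_one_cons hlt]
        simp only [List.map_cons, hfull]
        have hstep : pvLoopA k (fuel+1) acc tol (10^(a+1)) (10^(a+1)) =
            pvLoopA k fuel (acc ++ [(10^(a+1), 10^(a+1) + 10^(a+1))]) (10^(a+1))
              (10^(a+1) + 10^(a+1)) (10^(a+1) * 10) := by
          simp [pvLoopA, h]
        rw [hstep]
        have hpos : (0:Int) < 10^(a+1) := by positivity
        have := ih (a+1) 2 (10^(a+1)) (2 * 10^(a+1)) (10^(a+1+1))
          (acc ++ [(10^(a+1), 2 * 10^(a+1))])
          (Or.inr (Or.inr ⟨by omega, by omega, by omega, rfl, rfl, rfl⟩)) (by omega)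
        have e1 : (10:Int)^(a+1) + 10^(a+1) = 2 * 10^(a+1) := by ring
        have e2 : (10:Int)^(a+1) * 10 = 10^(a+1+1) := by ring
        rw [e1, e2, this]
        have : pvIdx (a+1) 2 = pvIdx (a+1) 1 + 1 := by
          unfold pvIdx; rw [if_neg (by omega), if_neg (by omega)]; ring
        rw [this]
        simp
      · -- middle of decade d ≥ 1: j ∈ [2,9]
        obtain ⟨a, rfl⟩ : ∃ a, d = a + 1 := ⟨d - 1, by omega⟩
        subst h4 h5
        rw [h6] at hf h ⊢
        have hpos : (0:Int) < 10^(a+1) := by positivity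
        have hidxe : pvIdx (a+1) j = 10 + 9 * (a:Int) + (j - 1) := by
          unfold pvIdx; rw [if_neg (by omega)]; push_cast; ring
        have hfull : pvIntervalB (pvIdx (a+1) j) = (j * 10^(a+1), (j+1) * 10^(a+1)) := by
          rw [hidxe, pvIntervalB_decade a j (by omega) (by omega)]
        have hlt : pvIdx (a+1) j < N := (hb _ hidx0).mp (by rw [hfull]; exact h)
        rw [PySem.List.pyRange_one_cons hlt]
        simp only [List.map_cons, hfull]
        have hb10 : j * 10^(a+1) < 10^(a+1+1) := by
          have : (10:Int)^(a+1+1) = 10 * 10^(a+1) := by ring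
          nlinarith
        have hstep : pvLoopA k (fuel+1) acc (10^(a+1)) (j * 10^(a+1)) (10^(a+1+1)) =
            pvLoopA k fuel (acc ++ [(j * 10^(a+1), j * 10^(a+1) + 10^(a+1))]) (10^(a+1))
              (j * 10^(a+1) + 10^(a+1)) (10^(a+1+1)) := by
          simp [pvLoopA, h, hb10]
        rw [hstep]
        have e1 : j * 10^(a+1) + 10^(a+1) = (j+1) * 10^(a+1) := by ring
        rw [e1]
        by_cases hj : j ≤ 8
        · have := ih (a+1) (j+1) (10^(a+1)) ((j+1) * 10^(a+1)) (10^(a+1+1))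
            (acc ++ [(j * 10^(a+1), (j+1) * 10^(a+1))])
            (Or.inr (Or.inr ⟨by omega, by omega, by omega, rfl, rfl, rfl⟩)) (by omega)
          rw [this]
          have : pvIdx (a+1) (j+1) = pvIdx (a+1) j + 1 := by
            unfold pvIdx; rw [if_neg (by omega), if_neg (by omega)]; ring
          rw [this]
          simp
        · have hj9 : j = 9 := by omega
          subst hj9
          have e3 : ((9:Int)+1) * 10^(a+1) = 10^(a+1+1) := by ring
          rw [e3]
          have := ih (a+1+1) 1 (10^(a+1)) (10^(a+1+1)) (10^(a+1+1))
            (acc ++ [(9 * 10^(a+1), 10^(a+1+1))])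
            (Or.inr (Or.inl ⟨by omega, rfl, rfl, rfl⟩)) (by omega)
          rw [this]
          have : pvIdx (a+1+1) 1 = pvIdx (a+1) 9 + 1 := by
            unfold pvIdx; rw [if_neg (by omega), if_neg (by omega)]; push_cast; ring
          rw [this]
          simp
    · rw [pvLoopA_notlt k (fuel+1) acc tol temp base h]
      have hstart : (pvIntervalB (pvIdx d j)).1 = temp := by
        rcases hst with ⟨hd,h2,h3,_,_,h6⟩|⟨h1,h2,h3,_⟩|⟨h1,h2,h3,_,_,h6⟩
        · subst hd; unfold pvIdx; rw [if_pos rfl, pvIntervalB_lt10 j (by omega)]; omega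
        · obtain ⟨a, rfl⟩ : ∃ a, d = a + 1 := ⟨d - 1, by omega⟩
          unfold pvIdx; rw [if_neg (by omega)]
          have : (10:Int) + 9 * (((a+1:Nat):Int) - 1) + (j - 1) = 10 + 9 * (a:Int) + (j - 1) := by
            push_cast; ring
          rw [this, pvIntervalB_decade a j (by omega) (by omega)]
          simp [h2, h3]
        · obtain ⟨a, rfl⟩ : ∃ a, d = a + 1 := ⟨d - 1, by omega⟩
          unfold pvIdx; rw [if_neg (by omega)]
          have : (10:Int) + 9 * (((a+1:Nat):Int) - 1) + (j - 1) = 10 + 9 * (a:Int) + (j - 1) := by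
            push_cast; ring
          rw [this, pvIntervalB_decade a j (by omega) (by omega)]
          simp [h6]
      have : N ≤ pvIdx d j := by
        by_contra hcon
        have := (hb (pvIdx d j) hidx0).mpr (by omega)
        omega
      rw [PySem.List.pyRange_one_eq_nil this]
      simp

theorem pv_final (k : Int) : generate_power_intervals k = generate_power_intervals_alt k := by
  unfold generate_power_intervals generate_power_intervals_alt
  by_cases h0 : k ≤ 0
  · rw [if_pos h0, pvLoopA_notlt k _ _ _ _ _ (by omega)]
  · rw [if_neg h0]
    by_cases h10 : k ≤ 10
    · simp only [if_pos h10]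
      have := pvA_main k k (pv_bridge_small k (by omega) h10) (k.toNat + 1) 0 0 1 0 10 []
        (Or.inl ⟨rfl, le_refl _, by omega, rfl, rfl, rfl⟩) (by omega)
      rw [this]
      have : pvIdx 0 0 = 0 := by unfold pvIdx; rw [if_pos rfl]
      rw [this]
      simp
    · simp only [if_neg h10]
      -- scan spec at dn = 1
      have hcap : k ≤ 10 ^ (1 + 1) * 10 ^ k.toNat := by
        have h1 : k.toNat < 2 ^ k.toNat := Nat.lt_two_pow_self
        have h2 : (2:Nat) ^ k.toNat ≤ 10 ^ k.toNat := Nat.pow_le_pow_left (by norm_num) _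
        have h3 : (k.toNat : Int) < ((10:Nat) ^ k.toNat : Nat) := by exact_mod_cast lt_of_lt_of_le h1 h2
        have h4 : ((10:Nat) ^ k.toNat : Int) = (10:Int) ^ k.toNat := by push_cast; ring
        have h5 : (0:Int) < 10 ^ k.toNat := by positivity
        have h6 : (k.toNat : Int) < (10:Int) ^ k.toNat := by rw [← h4]; exact h3
        have h7 : (k.toNat : Int) = k := by omega
        have h8 : k < (10:Int) ^ k.toNat := by omega
        have h9 : (10:Int)^(1+1) = 100 := by norm_num
        rw [h9]
        nlinarith [h8, h5]
      obtain ⟨e, he1, he2, he3, he4⟩ := pvScanB_spec k k.toNat 1 (le_refl _) (by norm_num; omega) hcap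
      have he2' : pvScanB k k.toNat 10 1 = ((10:Int)^e, (e:Int)) := by
        have : ((10:Int)^1) = 10 := by norm_num
        rw [← this]
        have : ((1:Nat) : Int) = 1 := by norm_num
        rw [← this]
        exact he2
      rw [he2']
      simp only
      exact pvA_main k _ (pv_bridge_big k e he1 he3 he4) (k.toNat + 1) 0 0 1 0 10 []
        (Or.inl ⟨rfl, le_refl _, by omega, rfl, rfl, rfl⟩) (by omega) |>.trans (by
          have : pvIdx 0 0 = 0 := by unfold pvIdx; rw [if_pos rfl]
          rw [this]; simp)

-- ===== VERDICT (by name: the statement is the Claim_ definition above) =====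
theorem generate_power_intervals_spec : Claim_equal_generate_power_intervals := by
  intro k _
  unfold Spec_generate_power_intervals
  exact pv_final k
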